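-- pv_equiv track=rewrite | github.com/GoogleCloudPlatform/genmedia-izumi-agent | mediagent_kit/services/aio/firestore_session_service.py | _extract_state_delta
-- ===== SOURCE A (Python) =====
-- from typing import TYPE_CHECKING, Any
--
-- def _extract_state_delta(
--     state: dict[str, Any] | None,
-- ) -> dict[str, dict[str, Any]]:
--     """Extracts app, user, and session state deltas from a state dictionary."""
--     deltas: dict[str, dict[str, Any]] = {"app": {}, "user": {}, "session": {}}
--     if state:
--         for key, value in state.items():
--             if key.startswith("app."):
--                 deltas["app"][key.removeprefix("app.")] = value
--             elif key.startswith("user."):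
--                 deltas["user"][key.removeprefix("user.")] = value
--             elif not key.startswith("temp."):
--                 deltas["session"][key] = value
--     return deltas
-- ===== SOURCE B (Python) =====
-- def _extract_state_delta(state):
--     items = (state or {}).items()
--     return {
--         "app": {k.removeprefix("app."): v for k, v in items if k.startswith("app.")},
--         "user": {k.removeprefix("user."): v for k, v in items if k.startswith("user.")},
--         "session": {
--             k: v
--             for k, v in items
--             if not k.startswith(("app.", "user.", "temp."))
--         },
--     }
-- ===== Notes on version B (the rewrite author's own statement) =====
-- stated objective: idiomatic
-- what changed: Replaces the single per-key if/elif loop mutating nested dicts with three independent dictionary comprehensions (one pass per bucket) assembled into the result literal.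
import Mathlib
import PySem

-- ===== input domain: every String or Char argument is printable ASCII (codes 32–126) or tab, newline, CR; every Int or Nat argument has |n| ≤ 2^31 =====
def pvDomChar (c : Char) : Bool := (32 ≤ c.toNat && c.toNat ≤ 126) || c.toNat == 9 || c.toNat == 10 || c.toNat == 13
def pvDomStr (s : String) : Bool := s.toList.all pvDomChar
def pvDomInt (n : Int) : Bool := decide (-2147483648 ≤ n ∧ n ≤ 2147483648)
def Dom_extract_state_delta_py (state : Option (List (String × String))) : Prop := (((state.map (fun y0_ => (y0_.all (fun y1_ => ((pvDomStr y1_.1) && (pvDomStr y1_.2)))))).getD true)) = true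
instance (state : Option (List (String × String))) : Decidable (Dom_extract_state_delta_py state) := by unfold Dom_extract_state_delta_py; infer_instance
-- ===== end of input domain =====

-- B replaces A's single per-key if/elif loop by three independent dictionary comprehensions (idiomatic; same cost).

-- ===== PORT A =====
-- str.removeprefix (not in PySem): exact [drop the prefix's characters iff the string starts with it]
def pyRemoveprefix (s p : String) : String :=
  if PySem.Str.startswith s p then String.ofList (s.toList.drop p.toList.length) else s

def pvStepA (d : PySem.Dict String (PySem.Dict String String)) (kv : String × String) :
    PySem.Dict String (PySem.Dict String String) :=
  if PySem.Str.startswith kv.1 "app." then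
    d.modify "app" PySem.Dict.empty (fun m => m.insert (pyRemoveprefix kv.1 "app.") kv.2)
  else if PySem.Str.startswith kv.1 "user." then
    d.modify "user" PySem.Dict.empty (fun m => m.insert (pyRemoveprefix kv.1 "user.") kv.2)
  else if !PySem.Str.startswith kv.1 "temp." then
    d.modify "session" PySem.Dict.empty (fun m => m.insert kv.1 kv.2)
  else d

def extract_state_delta_py (state : Option (List (String × String))) : List (String × List (String × String)) :=
  let deltas : PySem.Dict String (PySem.Dict String String) :=
    PySem.Dict.mk [("app", PySem.Dict.empty), ("user", PySem.Dict.empty), ("session", PySem.Dict.empty)]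
  let deltas :=
    match state with
    | none => deltas
    | some l => if l.isEmpty then deltas else l.foldl pvStepA deltas
  deltas.items.map (fun p => (p.1, p.2.items))

-- ===== PORT B =====
def pvDictOf (l : List (String × String)) : PySem.Dict String String :=
  l.foldl (fun d p => d.insert p.1 p.2) PySem.Dict.empty

def extract_state_delta_py_alt (state : Option (List (String × String))) : List (String × List (String × String)) :=
  let items := state.getD []
  [("app", (pvDictOf (((items.filter (fun p => PySem.Str.startswith p.1 "app.")).map
      (fun p => (pyRemoveprefix p.1 "app.", p.2))))).items),
   ("user", (pvDictOf (((items.filter (fun p => PySem.Str.startswith p.1 "user.")).map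
      (fun p => (pyRemoveprefix p.1 "user.", p.2))))).items),
   ("session", (pvDictOf (items.filter (fun p =>
      !(PySem.Str.startswith p.1 "app." || PySem.Str.startswith p.1 "user." || PySem.Str.startswith p.1 "temp.")))).items)]

-- ===== PRECONDITION & SPEC =====
def Spec_extract_state_delta_py (state : Option (List (String × String))) (out : List (String × List (String × String))) : Prop := out = extract_state_delta_py_alt state
instance (state : Option (List (String × String))) (out : List (String × List (String × String))) : Decidable (Spec_extract_state_delta_py state out) := by unfold Spec_extract_state_delta_py; infer_instance

-- ===== CLAIM (what is proved, stated in full; the proofs are below) =====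
def Claim_equal_extract_state_delta_py : Prop := ∀ (state : Option (List (String × String))), Dom_extract_state_delta_py state → Spec_extract_state_delta_py state (extract_state_delta_py state)

-- ===== LEMMAS AND PROOFS =====

-- pvStepA on the three fixed buckets, written out branch by branch
theorem pvStepA_mk3 (a u s : PySem.Dict String String) (kv : String × String) :
    pvStepA (PySem.Dict.mk [("app", a), ("user", u), ("session", s)]) kv =
      if PySem.Str.startswith kv.1 "app." then
        PySem.Dict.mk [("app", a.insert (pyRemoveprefix kv.1 "app.") kv.2), ("user", u), ("session", s)]
      else if PySem.Str.startswith kv.1 "user." then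
        PySem.Dict.mk [("app", a), ("user", u.insert (pyRemoveprefix kv.1 "user.") kv.2), ("session", s)]
      else if !PySem.Str.startswith kv.1 "temp." then
        PySem.Dict.mk [("app", a), ("user", u), ("session", s.insert kv.1 kv.2)]
      else PySem.Dict.mk [("app", a), ("user", u), ("session", s)] := by
  simp only [pvStepA]
  split_ifs <;>
    simp [PySem.Dict.modify, PySem.Dict.getD, PySem.Dict.get?, List.find?,
      PySem.Dict.insert, PySem.Dict.contains]

-- two different dotted prefixes (distinct first characters) cannot both start the same string
theorem pvStartswith_disjoint {cs p q : List Char} {x y : Char} (hxy : x ≠ y)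
    (h : PySem.Chars.startswith cs (x :: p) = true) :
    PySem.Chars.startswith cs (y :: q) = false := by
  rw [PySem.Chars.startswith_iff] at h
  obtain ⟨t, rfl⟩ := h
  rw [Bool.eq_false_iff]
  intro hc
  rw [PySem.Chars.startswith_iff] at hc
  obtain ⟨t', he⟩ := hc
  simp only [List.cons_append, List.cons.injEq] at he
  exact hxy he.1.symm

-- the three-bucket loop invariant: A's fold over the items, started from any three buckets,
-- ends with each bucket extended by the inserts of its own filtered slice of the list
theorem pvLoopA (l : List (String × String)) (a u s : PySem.Dict String String) :
    l.foldl pvStepA (PySem.Dict.mk [("app", a), ("user", u), ("session", s)]) =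
    PySem.Dict.mk [("app",
        ((l.filter (fun p => PySem.Str.startswith p.1 "app.")).map
          (fun p => (pyRemoveprefix p.1 "app.", p.2))).foldl (fun d p => d.insert p.1 p.2) a),
      ("user",
        ((l.filter (fun p => PySem.Str.startswith p.1 "user.")).map
          (fun p => (pyRemoveprefix p.1 "user.", p.2))).foldl (fun d p => d.insert p.1 p.2) u),
      ("session",
        (l.filter (fun p =>
          !(PySem.Str.startswith p.1 "app." || PySem.Str.startswith p.1 "user." || PySem.Str.startswith p.1 "temp."))).foldl
          (fun d p => d.insert p.1 p.2) s)] := by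
  induction l generalizing a u s with
  | nil => rfl
  | cons hd tl ih =>
    rw [List.foldl_cons, pvStepA_mk3]
    split_ifs with h1 h2 h3 <;> rw [ih]
    · have ha : PySem.Chars.startswith hd.1.toList ['a','p','p','.'] = true := by simpa using h1
      have hu : PySem.Chars.startswith hd.1.toList ['u','s','e','r','.'] = false :=
        pvStartswith_disjoint (by decide) ha
      have ht : PySem.Chars.startswith hd.1.toList ['t','e','m','p','.'] = false :=
        pvStartswith_disjoint (by decide) ha
      simp_all
    · have hus : PySem.Chars.startswith hd.1.toList ['u','s','e','r','.'] = true := by simpa using h2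
      have ht : PySem.Chars.startswith hd.1.toList ['t','e','m','p','.'] = false :=
        pvStartswith_disjoint (by decide) hus
      simp_all
    · simp_all
    · simp_all

-- ===== VERDICT (by name: the statement is the Claim_ definition above) =====
theorem extract_state_delta_py_spec : Claim_equal_extract_state_delta_py := by
  intro state _
  unfold Spec_extract_state_delta_py extract_state_delta_py extract_state_delta_py_alt pvDictOf
  match state with
  | none => rfl
  | some l =>
    cases l with
    | nil => rfl
    | cons hd tl =>
      show (List.map (fun p => (p.1, p.2.items))
          ((hd :: tl).foldl pvStepA (PySem.Dict.mk
            [("app", PySem.Dict.empty), ("user", PySem.Dict.empty), ("session", PySem.Dict.empty)])).items) = _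
      rw [pvLoopA]; rfl
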